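-- pv_equiv track=rewrite | github.com/ro123/study | net_inf/Functions/convertions.py | prefix_to_binary
-- ===== SOURCE A (Python) =====
-- def prefix_to_binary(prefix):
--     binary = list('1'*int(prefix) + '0'*(32-int(prefix)))
--     strbinary = ''
--     for i in range(len(binary)):
--         if i==7 or i ==15 or i ==23:
--             strbinary = strbinary + binary[i] + '.'
--         else:
--             strbinary += binary[i]
--     return strbinary
-- ===== SOURCE B (Python) =====
-- def prefix_to_binary(prefix):
--     s = '1'*int(prefix) + '0'*(32-int(prefix))
--     return '.'.join([s[0:8], s[8:16], s[16:24], s[24:]])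
-- ===== Notes on version B (the rewrite author's own statement) =====
-- stated objective: simpler
-- what changed: B builds the same bit string but replaces A's char-by-char index loop with per-position dot tests by slicing the string into four octets and joining them with a dot.
import Mathlib
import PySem

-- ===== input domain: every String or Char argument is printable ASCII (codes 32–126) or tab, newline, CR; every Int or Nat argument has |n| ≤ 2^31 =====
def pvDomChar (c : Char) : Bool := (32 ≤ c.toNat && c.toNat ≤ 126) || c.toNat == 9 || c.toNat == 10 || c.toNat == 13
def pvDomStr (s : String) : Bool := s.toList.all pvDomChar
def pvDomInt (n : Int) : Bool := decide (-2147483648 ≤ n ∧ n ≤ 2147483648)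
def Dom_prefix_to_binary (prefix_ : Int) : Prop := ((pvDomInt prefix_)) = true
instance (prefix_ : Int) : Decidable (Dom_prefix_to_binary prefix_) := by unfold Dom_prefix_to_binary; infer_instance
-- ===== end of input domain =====

-- B replaces A's index loop with per-if dot tests by slicing the bit string into octets and joining them with '.': simpler, same value.

-- ===== PORT A =====
-- '1'*int(prefix) + '0'*(32-int(prefix)):  Python string repetition gives '' for a
-- negative count, exactly List.replicate ∘ Int.toNat.  binary[i] is indexed only with
-- i ∈ range(len(binary)), always in range, so getD with a dummy default is exact.
def prefix_to_binary (prefix_ : Int) : String :=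
  let binary : List Char :=
    List.replicate prefix_.toNat '1' ++ List.replicate (32 - prefix_).toNat '0'
  let strbinary : List Char :=
    (List.range binary.length).foldl
      (fun acc i =>
        if i = 7 ∨ i = 15 ∨ i = 23 then acc ++ [binary.getD i ' ', '.']
        else acc ++ [binary.getD i ' ']) []
  String.mk strbinary

-- ===== PORT B =====
-- s[0:8], s[8:16], s[16:24], s[24:] joined with '.' (nonnegative slice bounds = take/drop).
def prefix_to_binary_alt (prefix_ : Int) : String :=
  let s : List Char :=
    List.replicate prefix_.toNat '1' ++ List.replicate (32 - prefix_).toNat '0'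
  String.mk (s.take 8 ++ '.' :: (s.drop 8).take 8 ++ '.' :: (s.drop 16).take 8 ++ '.' :: s.drop 24)

-- ===== PRECONDITION & SPEC =====
def Spec_prefix_to_binary (prefix_ : Int) (out : String) : Prop := out = prefix_to_binary_alt prefix_
instance (prefix_ : Int) (out : String) : Decidable (Spec_prefix_to_binary prefix_ out) := by unfold Spec_prefix_to_binary; infer_instance

-- ===== CLAIM (what is proved, stated in full; the proofs are below) =====
def Claim_equal_prefix_to_binary : Prop := ∀ (prefix_ : Int), Dom_prefix_to_binary prefix_ → Spec_prefix_to_binary prefix_ (prefix_to_binary prefix_)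

-- ===== LEMMAS AND PROOFS =====

theorem pvFoldFlat (ns : List Nat) (acc : List Char) (g : Nat → List Char) :
    ns.foldl (fun a i => a ++ g i) acc = acc ++ ns.flatMap g := by
  induction ns generalizing acc with
  | nil => simp
  | cons x xs ih => simp [List.foldl_cons, ih]

theorem pvSliceMap (l : List Char) (s k : Nat) (h : s + k ≤ l.length) :
    (List.range k).map (fun j => l.getD (s + j) ' ') = (l.drop s).take k := by
  apply List.ext_getElem
  · simp; omega
  · intro j h1 h2
    simp only [List.getElem_map, List.getElem_range, List.getElem_take, List.getElem_drop]
    rw [List.getD_eq_getElem l ' ' (by simp at h1; omega)]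

theorem pvDropMap (l : List Char) (s k : Nat) (h : s + k = l.length) :
    (List.range k).map (fun j => l.getD (s + j) ' ') = l.drop s := by
  rw [pvSliceMap l s k (by omega)]
  exact List.take_of_length_le (by simp; omega)

theorem pvFlatSingleton (ns : List Nat) (f : Nat → Char) :
    ns.flatMap (fun j => [f j]) = ns.map f := by
  induction ns with
  | nil => rfl
  | cons x xs ih => simp only [List.flatMap_cons, List.map_cons, ih]; rfl

theorem pvMain (l : List Char) (h : 24 ≤ l.length) :
    (List.range l.length).foldl
      (fun acc i =>
        if i = 7 ∨ i = 15 ∨ i = 23 then acc ++ [l.getD i ' ', '.']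
        else acc ++ [l.getD i ' ']) [] =
    l.take 8 ++ '.' :: (l.drop 8).take 8 ++ '.' :: (l.drop 16).take 8 ++ '.' :: l.drop 24 := by
  have hfun : (fun (acc : List Char) (i : Nat) =>
      if i = 7 ∨ i = 15 ∨ i = 23 then acc ++ [l.getD i ' ', '.'] else acc ++ [l.getD i ' '])
      = (fun acc i => acc ++ (if i = 7 ∨ i = 15 ∨ i = 23 then [l.getD i ' ', '.'] else [l.getD i ' '])) := by
    funext a i; split <;> rfl
  rw [hfun, pvFoldFlat, List.nil_append]
  have hn : l.length = 24 + (l.length - 24) := by omega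
  rw [hn, List.range_add, List.flatMap_append, List.flatMap_map]
  have htail : (List.range (l.length - 24)).flatMap
      (fun j => if 24 + j = 7 ∨ 24 + j = 15 ∨ 24 + j = 23 then [l.getD (24 + j) ' ', '.'] else [l.getD (24 + j) ' '])
      = (List.range (l.length - 24)).map (fun j => l.getD (24 + j) ' ') := by
    have : ∀ j, (if 24 + j = 7 ∨ 24 + j = 15 ∨ 24 + j = 23 then [l.getD (24 + j) ' ', '.'] else [l.getD (24 + j) ' '])
        = [l.getD (24 + j) ' '] := by intro j; rw [if_neg (by omega)]
    simp only [this]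
    exact pvFlatSingleton _ _
  rw [htail, pvDropMap l 24 (l.length - 24) (by omega)]
  have h0 := pvSliceMap l 0 8 (by omega)
  rw [List.drop_zero] at h0
  rw [← h0, ← pvSliceMap l 8 8 (by omega), ← pvSliceMap l 16 8 (by omega)]
  simp [List.range_succ]

-- ===== VERDICT (by name: the statement is the Claim_ definition above) =====
theorem prefix_to_binary_spec : Claim_equal_prefix_to_binary := by
  intro p _
  unfold Spec_prefix_to_binary prefix_to_binary prefix_to_binary_alt
  exact congrArg String.mk (pvMain (List.replicate p.toNat '1' ++ List.replicate (32 - p).toNat '0')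
    (by simp only [List.length_append, List.length_replicate]; omega))
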